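-- pv_equiv track=rewrite | github.com/jiohjung98/CodingTest_Practice | python/귤 고르기.py | solution
-- ===== SOURCE A (Python) =====
-- def solution(k, tangerine):
--     count_dict = {}
--     for t in tangerine:
--         count_dict[t] = count_dict.get(t, 0) + 1
--
--     target_arr = sorted(count_dict.values(), reverse=True)
--     answer = 0
--     tmp = 0
--     for count in target_arr:
--         tmp += count
--         answer += 1
--         if tmp >= k:
--             break
--     return 1 if max(target_arr) >= k else answer
-- ===== SOURCE B (Python) =====
-- def solution(k, tangerine):
--     freq = {}
--     for t in tangerine:
--         freq[t] = freq.get(t, 0) + 1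
--     # counting-sort idea: how many kinds occur with each count c, then greedy from
--     # the largest count, taking a whole group at once with one ceiling division.
--     size_count = {}
--     for c in freq.values():
--         size_count[c] = size_count.get(c, 0) + 1
--     answer = 0
--     remaining = k
--     for c in range(len(tangerine), 0, -1):
--         b = size_count.get(c, 0)
--         if b == 0:
--             continue
--         if b * c >= remaining:
--             # at least one kind is taken before the >= k check (do-while, as in A)
--             return answer + max((remaining + c - 1) // c, 1)
--         answer += b
--         remaining -= b * c
--     return answer
-- ===== Notes on version B (the rewrite author's own statement) =====
-- stated objective: alternative
-- what changed: B replaces A's comparison sort of the frequency values by a counting-sort-style counter-of-counts, scanning counts from largest to smallest and taking each whole group at once with one ceiling division instead of one loop iteration per kind.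
import Mathlib
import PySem

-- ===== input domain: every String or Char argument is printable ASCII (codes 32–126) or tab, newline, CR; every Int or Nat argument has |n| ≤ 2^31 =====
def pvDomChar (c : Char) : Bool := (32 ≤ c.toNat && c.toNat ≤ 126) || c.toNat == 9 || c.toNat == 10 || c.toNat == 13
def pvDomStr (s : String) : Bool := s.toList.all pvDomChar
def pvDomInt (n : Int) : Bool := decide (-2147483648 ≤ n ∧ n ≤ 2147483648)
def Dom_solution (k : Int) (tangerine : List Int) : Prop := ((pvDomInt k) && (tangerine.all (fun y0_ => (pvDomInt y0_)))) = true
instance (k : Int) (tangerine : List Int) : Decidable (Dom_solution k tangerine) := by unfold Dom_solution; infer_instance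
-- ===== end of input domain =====

-- B replaces A's sort of the frequency values by a counter-of-counts scanned from the largest
-- count, taking each whole group at once with a ceiling division (objective: alternative algorithm).


-- ===== PORT A =====
-- the 'for count in target_arr: tmp += count; answer += 1; if tmp >= k: break' loop
def solutionLoop (k : Int) : List Int → Int → Int → Int
  | [], _tmp, answer => answer
  | count :: rest, tmp, answer =>
      if tmp + count ≥ k then answer + 1
      else solutionLoop k rest (tmp + count) (answer + 1)

def solution (k : Int) (tangerine : List Int) : Int :=
  let count_dict := tangerine.foldl (fun d t => d.insert t (d.getD t 0 + 1)) PySem.Dict.empty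
  let target_arr := PySem.List.sorted count_dict.values (fun x => x) true
  let answer := solutionLoop k target_arr 0 0
  match PySem.List.max? target_arr (fun x => x) with
  | some m => if m ≥ k then 1 else answer
  | none => 0   -- max([]) : Python raises ValueError here; excluded by Pre_solution

-- ===== PORT B =====
-- the 'for c in range(len(tangerine), 0, -1)' loop of Source B, with its two early exits
def altLoop (sizeCount : PySem.Dict Int Int) : List Int → Int → Int → Int
  | [], answer, _remaining => answer
  | c :: rest, answer, remaining =>
      let b := sizeCount.getD c 0
      if b = 0 then altLoop sizeCount rest answer remaining
      else if b * c ≥ remaining then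
        answer + max (PySem.Int.floordiv (remaining + c - 1) c) 1
      else altLoop sizeCount rest (answer + b) (remaining - b * c)

def solution_alt (k : Int) (tangerine : List Int) : Int :=
  let freq := tangerine.foldl (fun d t => d.insert t (d.getD t 0 + 1)) PySem.Dict.empty
  let sizeCount := freq.values.foldl (fun d c => d.insert c (d.getD c 0 + 1)) PySem.Dict.empty
  altLoop sizeCount (PySem.List.pyRange (tangerine.length : Int) 0 (-1)) 0 k

-- ===== PRECONDITION & SPEC =====
-- Pre_ excludes only the empty list, on which A raises ValueError (max() of empty sequence).
def Pre_solution (k : Int) (tangerine : List Int) : Prop := tangerine ≠ []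
instance (k : Int) (tangerine : List Int) : Decidable (Pre_solution k tangerine) := by unfold Pre_solution; infer_instance
def pvWitness_solution : Int × List Int := (2, [1, 2, 2, 3])

def Spec_solution (k : Int) (tangerine : List Int) (out : Int) : Prop := out = solution_alt k tangerine
instance (k : Int) (tangerine : List Int) (out : Int) : Decidable (Spec_solution k tangerine out) := by unfold Spec_solution; infer_instance

-- ===== CLAIM (what is proved, stated in full; the proofs are below) =====
def Claim_equal_solution : Prop := ∀ (k : Int) (tangerine : List Int), Dom_solution k tangerine → Pre_solution k tangerine → Spec_solution k tangerine (solution k tangerine)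

-- ===== LEMMAS AND PROOFS =====

-- ceiling-division facts about (x+c-1)//c
theorem pv_fd_shift (x c : Int) (hc : 0 < c) :
    PySem.Int.floordiv (x + c - 1) c = PySem.Int.floordiv (x - c + c - 1) c + 1 := by
  rw [PySem.Int.floordiv_eq_ediv_of_pos hc, PySem.Int.floordiv_eq_ediv_of_pos hc]
  have : x + c - 1 = (x - c + c - 1) + 1 * c := by ring
  rw [this, Int.add_mul_ediv_right _ _ (by omega : c ≠ 0)]

theorem pv_fd_ge_one (x c : Int) (hc : 0 < c) (hx : 1 ≤ x) :
    1 ≤ PySem.Int.floordiv (x + c - 1) c := by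
  rw [PySem.Int.floordiv_eq_ediv_of_pos hc]
  exact Int.le_ediv_iff_mul_le hc |>.mpr (by omega)

theorem pv_fd_le_one (x c : Int) (hc : 0 < c) (hx : x ≤ c) :
    PySem.Int.floordiv (x + c - 1) c ≤ 1 := by
  rw [PySem.Int.floordiv_eq_ediv_of_pos hc]
  have : x + c - 1 < 2 * c := by omega
  have h2 := Int.ediv_le_ediv (by omega : (0:Int) < c) (by omega : x + c - 1 ≤ 2 * c - 1)
  calc (x + c - 1) / c ≤ (2 * c - 1) / c := h2
    _ ≤ 1 := by
        have : 2 * c - 1 = (c - 1) + 1 * c := by ring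
        rw [this, Int.add_mul_ediv_right _ _ (by omega : c ≠ 0),
            Int.ediv_eq_zero_of_lt (by omega) (by omega)]
        omega

-- A's scan across a block of m equal counts c equals one ceiling division (clamped at 1,
-- because A's loop body runs once before testing tmp >= k)
theorem pv_loop_replicate (k c : Int) (hc : 1 ≤ c) :
    ∀ (m : Nat) (tail : List Int) (tmp answer : Int),
    solutionLoop k (List.replicate m c ++ tail) tmp answer =
      if 1 ≤ m ∧ k - tmp ≤ (m : Int) * c
      then answer + max (PySem.Int.floordiv (k - tmp + c - 1) c) 1
      else solutionLoop k tail (tmp + (m : Int) * c) (answer + (m : Int)) := by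
  intro m
  induction m with
  | zero => intro tail tmp answer; simp
  | succ m ih =>
    intro tail tmp answer
    have hcast : ((m + 1 : Nat) : Int) * c = (m : Int) * c + c := by push_cast; ring
    have hmc : (0:Int) ≤ (m : Int) * c := by positivity
    rw [List.replicate_succ, List.cons_append]
    by_cases h1 : tmp + c ≥ k
    · rw [solutionLoop, if_pos h1, if_pos ⟨by omega, by rw [hcast]; omega⟩,
          max_eq_right (pv_fd_le_one (k - tmp) c (by omega) (by omega))]
    · rw [solutionLoop, if_neg h1, ih tail (tmp + c) (answer + 1)]
      by_cases h2 : 1 ≤ m ∧ k - (tmp + c) ≤ (m : Int) * c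
      · rw [if_pos h2, if_pos ⟨by omega, by rw [hcast]; omega⟩]
        rw [max_eq_left (pv_fd_ge_one (k - (tmp + c)) c (by omega) (by omega)),
            max_eq_left (pv_fd_ge_one (k - tmp) c (by omega) (by omega)),
            pv_fd_shift (k - tmp) c (by omega)]
        have : k - tmp - c + c - 1 = k - (tmp + c) + c - 1 := by ring
        rw [this]; ring
      · rw [if_neg h2, if_neg (by
          rintro ⟨-, hcon2⟩
          rw [hcast] at hcon2
          rcases Nat.eq_zero_or_pos m with hm | hm
          · subst hm; simp at hcon2; omega
          · exact h2 ⟨hm, by omega⟩)]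
        have e1 : tmp + c + (m : Int) * c = tmp + ((m + 1 : Nat) : Int) * c := by rw [hcast]; ring
        have e2 : answer + 1 + (m : Int) = answer + ((m + 1 : Nat) : Int) := by push_cast; ring
        rw [e1, e2]

-- A's scan over the grouped list = B's bucket loop
theorem pv_core (k : Int) (vs : List Int) (sizeCount : PySem.Dict Int Int)
    (hsc : ∀ c, sizeCount.getD c 0 = (vs.count c : Int)) :
    ∀ (cs : List Int), (∀ c ∈ cs, 1 ≤ c) → ∀ (tmp answer : Int),
    solutionLoop k (cs.flatMap (fun c => List.replicate (vs.count c) c)) tmp answer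
      = altLoop sizeCount cs answer (k - tmp) := by
  intro cs
  induction cs with
  | nil => intro _ tmp answer; simp [solutionLoop, altLoop]
  | cons c rest ih =>
    intro hpos tmp answer
    have hc : 1 ≤ c := hpos c (List.mem_cons_self ..)
    rw [List.flatMap_cons,
        pv_loop_replicate k c hc (vs.count c) _ tmp answer]
    show _ = altLoop sizeCount (c :: rest) answer (k - tmp)
    rw [altLoop]
    simp only [hsc]
    by_cases h0 : (vs.count c : Int) = 0
    · rw [if_pos h0]
      have : vs.count c = 0 := by exact_mod_cast h0
      rw [this]
      simp only [Nat.cast_zero, zero_mul]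
      rw [if_neg (by omega), add_zero, add_zero,
          ih (fun c hx => hpos c (List.mem_cons_of_mem _ hx)) tmp answer]
    · rw [if_neg h0]
      have hm1 : 1 ≤ vs.count c := by
        rcases Nat.eq_zero_or_pos (vs.count c) with h | h
        · exact absurd (by exact_mod_cast congrArg (Nat.cast : Nat → Int) h) h0
        · exact h
      by_cases h1 : (vs.count c : Int) * c ≥ k - tmp
      · rw [if_pos h1, if_pos ⟨by exact_mod_cast hm1, by omega⟩]
      · rw [if_neg h1, if_neg (by intro hcon; omega),
            ih (fun c hx => hpos c (List.mem_cons_of_mem _ hx)) (tmp + (vs.count c : Int) * c) (answer + (vs.count c : Int))]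
        congr 1
        ring

-- count of an element in the grouped list
theorem pv_count_flatMap_replicate (vs : List Int) :
    ∀ (cs : List Int), cs.Nodup → ∀ a : Int,
    (cs.flatMap (fun c => List.replicate (vs.count c) c)).count a
      = if a ∈ cs then vs.count a else 0 := by
  intro cs
  induction cs with
  | nil => simp
  | cons c rest ih =>
    intro hnd a
    rw [List.flatMap_cons, List.count_append, List.count_replicate,
        ih hnd.of_cons a]
    by_cases hac : a = c
    · subst hac
      have : a ∉ rest := (List.nodup_cons.mp hnd).1
      simp [this]
    · simp [hac, Ne.symm hac]

-- the grouped list is a permutation of vs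
theorem pv_perm_flatMap_replicate (vs cs : List Int) (hnd : cs.Nodup)
    (hcov : ∀ x ∈ vs, x ∈ cs) :
    (cs.flatMap (fun c => List.replicate (vs.count c) c)).Perm vs := by
  rw [List.perm_iff_count]
  intro a
  rw [pv_count_flatMap_replicate vs cs hnd a]
  by_cases ha : a ∈ cs
  · simp [ha]
  · simp [ha]
    exact (List.count_eq_zero.mpr (fun hav => ha (hcov a hav))).symm

-- the grouped list is descending when cs is strictly descending
theorem pv_pairwise_flatMap_replicate (vs : List Int) :
    ∀ (cs : List Int), cs.Pairwise (· > ·) →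
    (cs.flatMap (fun c => List.replicate (vs.count c) c)).Pairwise (fun a b => b ≤ a) := by
  intro cs
  induction cs with
  | nil => simp
  | cons c rest ih =>
    intro hp
    rw [List.flatMap_cons, List.pairwise_append]
    refine ⟨List.pairwise_replicate.mpr (by simp), ih hp.of_cons, ?_⟩
    intro a ha b hb
    have hac : a = c := List.eq_of_mem_replicate ha
    obtain ⟨c', hc', hb'⟩ := List.mem_flatMap.mp hb
    have hbc : b = c' := List.eq_of_mem_replicate hb'
    have := List.rel_of_pairwise_cons hp hc'
    omega

-- a descending rearrangement of vs names sorted(vs, reverse=True)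
theorem pv_sorted_rev_eq (vs ys : List Int) (hperm : ys.Perm vs)
    (hp : ys.Pairwise (fun a b => b ≤ a)) :
    PySem.List.sorted vs (fun x => x) true = ys := by
  have h1 : (PySem.List.sorted vs (fun x => x) true).reverse.Pairwise (fun a b : Int => a ≤ b) := by
    rw [List.pairwise_reverse]
    exact PySem.List.sorted_pairwise_rev vs (fun x => x)
  have h2 : ys.reverse.Pairwise (fun a b : Int => a ≤ b) := by
    rw [List.pairwise_reverse]; exact hp
  have h3 : (PySem.List.sorted vs (fun x => x) true).reverse.Perm ys.reverse :=
    (List.reverse_perm _).trans (((PySem.List.sorted_perm vs (fun x => x) true).trans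
      hperm.symm).trans (List.reverse_perm _).symm)
  have := PySem.List.eq_of_perm_of_pairwise_le_of_injective (fun x : Int => x)
    (fun _ _ h => h) h3 h1 h2
  have := congrArg List.reverse this
  simpa using this

theorem pv_pyRange_down_nodup (n : Int) : (PySem.List.pyRange n 0 (-1)).Nodup := by
  rw [PySem.List.pyRange_neg_one_eq_reverse]
  exact List.nodup_reverse.mpr (PySem.List.nodup_pyRange_one _ _)

theorem pv_pyRange_down_pairwise (n : Int) : (PySem.List.pyRange n 0 (-1)).Pairwise (· > ·) := by
  rw [PySem.List.pyRange_neg_one_eq_reverse, List.pairwise_reverse]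
  exact List.Pairwise.imp (fun h => h) (PySem.List.pairwise_lt_pyRange_one _ _)

-- the counter's values list, and bounds on its elements
theorem pv_values_counter (t : List Int) :
    (PySem.Dict.counter t).values = (PySem.Set.ofList t).map (fun v => (t.count v : Int)) := by
  simp [PySem.Dict.values, PySem.Dict.items_counter, List.map_map]

theorem pv_vs_bounds (t : List Int) (x : Int)
    (hx : x ∈ (PySem.Dict.counter t).values) : 1 ≤ x ∧ x ≤ (t.length : Int) := by
  rw [pv_values_counter] at hx
  obtain ⟨v, hv, rfl⟩ := List.mem_map.mp hx
  have hvt : v ∈ t := (PySem.Set.mem_ofList _ _).mp hv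
  have h1 : 0 < t.count v := List.count_pos_iff.mpr hvt
  have h2 : t.count v ≤ t.length := List.count_le_length
  omega

theorem pv_vs_ne_nil (t : List Int) (ht : t ≠ []) :
    (PySem.Dict.counter t).values ≠ [] := by
  rw [pv_values_counter]
  cases t with
  | nil => exact absurd rfl ht
  | cons a t' =>
    have ha : a ∈ PySem.Set.ofList (a :: t') := (PySem.Set.mem_ofList _ _).mpr (List.mem_cons_self ..)
    intro hmap
    rw [List.map_eq_nil_iff] at hmap
    rw [hmap] at ha
    exact absurd ha (List.not_mem_nil)

-- main equality
theorem pv_main (k : Int) (t : List Int) (ht : t ≠ []) :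
    solution k t = solution_alt k t := by
  have hAdef : solution k t =
      (match PySem.List.max? (PySem.List.sorted (PySem.Dict.counter t).values (fun x => x) true) (fun x => x) with
        | some m => if m ≥ k then (1 : Int)
            else solutionLoop k (PySem.List.sorted (PySem.Dict.counter t).values (fun x => x) true) 0 0
        | none => 0) := rfl
  have hBdef : solution_alt k t =
      altLoop ((PySem.Dict.counter t).values.foldl (fun d c => d.insert c (d.getD c 0 + 1))
          (PySem.Dict.empty : PySem.Dict Int Int))
        (PySem.List.pyRange (t.length : Int) 0 (-1)) 0 k := rfl
  rw [hAdef, hBdef]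
  set vs := (PySem.Dict.counter t).values with hvs
  set n := (t.length : Int) with hn
  set cs := PySem.List.pyRange n 0 (-1) with hcs
  set sc := vs.foldl (fun d c => d.insert c (d.getD c 0 + 1)) (PySem.Dict.empty : PySem.Dict Int Int) with hscdef
  have hsc : ∀ c, sc.getD c 0 = (vs.count c : Int) := by
    intro c
    rw [hscdef, PySem.Dict.getD_foldl_insert_add_one]
    simp
  have hcov : ∀ x ∈ vs, x ∈ cs := by
    intro x hx
    have := pv_vs_bounds t x hx
    exact PySem.List.mem_pyRange_neg_one.mpr (by omega)
  have hpos : ∀ c ∈ cs, 1 ≤ c := by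
    intro c hc
    have := PySem.List.mem_pyRange_neg_one.mp hc
    omega
  have htarget : PySem.List.sorted vs (fun x => x) true
      = cs.flatMap (fun c => List.replicate (vs.count c) c) :=
    pv_sorted_rev_eq vs _
      (pv_perm_flatMap_replicate vs cs (pv_pyRange_down_nodup n) hcov)
      (pv_pairwise_flatMap_replicate vs cs (pv_pyRange_down_pairwise n))
  have hloop : solutionLoop k (PySem.List.sorted vs (fun x => x) true) 0 0
      = altLoop sc cs 0 k := by
    rw [htarget]
    have := pv_core k vs sc hsc cs hpos 0 0
    simpa using this
  cases hmax : PySem.List.max? (PySem.List.sorted vs (fun x => x) true) (fun x => x) with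
  | none =>
    exact absurd ((PySem.List.sorted_eq_nil_iff _ _ _).mp
      ((PySem.List.max?_eq_none_iff _ _).mp hmax)) (pv_vs_ne_nil t ht)
  | some m =>
    show (if m ≥ k then (1:Int) else solutionLoop k (PySem.List.sorted vs (fun x => x) true) 0 0)
        = altLoop sc cs 0 k
    by_cases hmk : m ≥ k
    · rw [if_pos hmk, ← hloop]
      cases hsrt : PySem.List.sorted vs (fun x => x) true with
      | nil => exact absurd ((PySem.List.sorted_eq_nil_iff _ _ _).mp hsrt) (pv_vs_ne_nil t ht)
      | cons b0 bl =>
        have hm_mem : m ∈ vs := (PySem.List.mem_sorted _ _ _ _).mp (PySem.List.max?_mem hmax)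
        have hb0_mem : b0 ∈ PySem.List.sorted vs (fun x => x) true := by
          rw [hsrt]; exact List.mem_cons_self ..
        have h1 : b0 ≤ m := PySem.List.max?_isMax hmax b0 hb0_mem
        have h2 : m ≤ b0 := PySem.List.key_head_sorted_rev_ge vs (fun x => x) hsrt m hm_mem
        rw [solutionLoop, if_pos (by omega : (0:Int) + b0 ≥ k)]
        norm_num
    · rw [if_neg hmk]
      exact hloop

-- ===== VERDICT (by name: the statement is the Claim_ definition above) =====
theorem solution_spec : Claim_equal_solution := by
  intro k t _hdom hpre
  unfold Spec_solution
  exact pv_main k t hpre
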